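-- pv_equiv track=rewrite | github.com/Bingenberger/lernapps | lesetandem/scripts/generate_story_json.py | parse_hyphen_pattern
-- ===== SOURCE A (Python) =====
-- def parse_hyphen_pattern(pattern: str) -> tuple[str, list[int]]:
--     letters: list[str] = []
--     values = [0]
--
--     for char in pattern:
--         if char.isdigit():
--             values[-1] = int(char)
--         else:
--             letters.append(char)
--             values.append(0)
--
--     return "".join(letters), values
-- ===== SOURCE B (Python) =====
-- def parse_hyphen_pattern(pattern: str) -> tuple[str, list[int]]:
--     # Run-based tokenizer: each step consumes one maximal digit run (whose last
--     # digit is that gap's value, 0 if the run is empty) followed by one letter.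
--     letters = []
--     values = []
--     n = len(pattern)
--     i = 0
--     while True:
--         j = i
--         while j < n and pattern[j].isdigit():
--             j += 1
--         values.append(int(pattern[j - 1]) if j > i else 0)
--         if j == n:
--             break
--         letters.append(pattern[j])
--         i = j + 1
--     return "".join(letters), values
-- ===== Notes on version B (the rewrite author's own statement) =====
-- stated objective: alternative
-- what changed: B is a run-based tokenizer: an outer loop that each step consumes one maximal digit run (taking its last digit as the gap value, 0 for an empty run) plus one letter via an inner index scan, instead of A's single per-character loop that grows two lists and overwrites the last value slot.
import Mathlib
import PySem

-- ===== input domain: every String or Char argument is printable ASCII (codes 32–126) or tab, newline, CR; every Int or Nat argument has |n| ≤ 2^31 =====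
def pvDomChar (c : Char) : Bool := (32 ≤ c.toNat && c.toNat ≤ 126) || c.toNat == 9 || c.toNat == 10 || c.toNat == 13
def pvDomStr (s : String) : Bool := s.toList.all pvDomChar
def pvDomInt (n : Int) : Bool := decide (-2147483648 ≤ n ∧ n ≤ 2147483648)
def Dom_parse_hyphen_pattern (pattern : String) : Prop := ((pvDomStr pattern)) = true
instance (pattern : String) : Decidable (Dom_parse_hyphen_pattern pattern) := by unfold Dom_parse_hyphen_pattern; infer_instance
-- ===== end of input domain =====

-- B replaces A's iterative per-character loop by a recursive run-based tokenizer
-- (one maximal digit run + one letter per step); same cost, different algorithmic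
-- decomposition (objective: alternative). On the ASCII domain Python's
-- char.isdigit() is exactly Char.isDigit and int(c) for a digit char is c.toNat - 48.

-- ===== PORT A =====
-- A's loop: state (letters, values); digit → values[-1] = int(char)
-- (transcribed as values.dropLast ++ [v]); else append letter and 0.
def pvLoopA : List Char → List Char × List Int → List Char × List Int
  | [], s => s
  | c :: rest, (ls, vs) =>
    if c.isDigit then
      pvLoopA rest (ls, vs.dropLast ++ [((c.toNat : Int) - 48)])
    else
      pvLoopA rest (ls ++ [c], vs ++ [0])

def parse_hyphen_pattern (pattern : String) : String × List Int :=
  let s := pvLoopA pattern.toList ([], [0])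
  (String.ofList s.1, s.2)

-- ===== PORT B =====
-- Source B's outer loop: state (letters, values); each step scans off the maximal
-- leading digit run (the index scan `while j … j += 1` is ported as
-- takeWhile/dropWhile), appends the gap value (last digit of the run, 0 if
-- empty), then either breaks at the end or appends the letter and continues.
def pvGoB (s : List Char) (ls : List Char) (vs : List Int) : List Char × List Int :=
  let run := s.takeWhile Char.isDigit
  let rest := s.dropWhile Char.isDigit
  let v : Int := match run.getLast? with
    | some c => (c.toNat : Int) - 48
    | none => 0
  if h : rest = [] then (ls, vs ++ [v])
  else pvGoB rest.tail (ls ++ [rest.head h]) (vs ++ [v])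
termination_by s.length
decreasing_by
  have hle : (s.dropWhile Char.isDigit).length ≤ s.length := by
    simpa using List.length_dropWhile_le (p := Char.isDigit) (l := s)
  have hpos : 0 < (s.dropWhile Char.isDigit).length := List.length_pos_of_ne_nil h
  simp [List.length_tail]
  omega

def parse_hyphen_pattern_alt (pattern : String) : String × List Int :=
  let p := pvGoB pattern.toList [] []
  (String.ofList p.1, p.2)

-- ===== PRECONDITION & SPEC =====
def Spec_parse_hyphen_pattern (pattern : String) (out : String × List Int) : Prop := out = parse_hyphen_pattern_alt pattern
instance (pattern : String) (out : String × List Int) : Decidable (Spec_parse_hyphen_pattern pattern out) := by unfold Spec_parse_hyphen_pattern; infer_instance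

-- ===== CLAIM (what is proved, stated in full; the proofs are below) =====
def Claim_equal_parse_hyphen_pattern : Prop := ∀ (pattern : String), Dom_parse_hyphen_pattern pattern → Spec_parse_hyphen_pattern pattern (parse_hyphen_pattern pattern)

-- ===== LEMMAS AND PROOFS =====

-- proof helper: the pure (non-accumulator) form of B's run tokenizer
def pvRuns (s : List Char) : List Char × List Int :=
  let run := s.takeWhile Char.isDigit
  let rest := s.dropWhile Char.isDigit
  let v : Int := match run.getLast? with
    | some c => (c.toNat : Int) - 48
    | none => 0
  if h : rest = [] then ([], [v])
  else
    let p := pvRuns rest.tail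
    (rest.head h :: p.1, v :: p.2)
termination_by s.length
decreasing_by
  have hle : (s.dropWhile Char.isDigit).length ≤ s.length := by
    simpa using List.length_dropWhile_le (p := Char.isDigit) (l := s)
  have hpos : 0 < (s.dropWhile Char.isDigit).length := List.length_pos_of_ne_nil h
  simp [List.length_tail]
  omega



-- whether the next character is a digit (controls whether a digit char merges
-- into the current run or starts its own)
def pvHeadDigit : List Char → Bool
  | [] => false
  | c :: _ => c.isDigit

theorem pvRuns_nil : pvRuns [] = ([], [0]) := by
  rw [pvRuns]
  simp

theorem pvRuns_nondigit (c : Char) (t : List Char) (h : c.isDigit = false) :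
    pvRuns (c :: t) = (c :: (pvRuns t).1, 0 :: (pvRuns t).2) := by
  conv_lhs => rw [pvRuns]
  simp [h]

theorem pvRuns_digit_digit (c d : Char) (t : List Char) (hc : c.isDigit = true)
    (hd : d.isDigit = true) : pvRuns (c :: d :: t) = pvRuns (d :: t) := by
  conv_lhs => rw [pvRuns]
  conv_rhs => rw [pvRuns]
  simp [hc, hd, List.getLast?_cons_cons]

theorem pvRuns_digit_stop (c : Char) (t : List Char) (hc : c.isDigit = true)
    (ht : pvHeadDigit t = false) :
    pvRuns (c :: t) = ((pvRuns t).1, ((c.toNat : Int) - 48) :: (pvRuns t).2.tail) := by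
  cases t with
  | nil =>
    conv_lhs => rw [pvRuns]
    simp [hc, pvRuns_nil]
  | cons d t' =>
    simp only [pvHeadDigit] at ht
    conv_lhs => rw [pvRuns]
    simp [hc, ht, pvRuns_nondigit d t' ht]

theorem pvRuns_vals_ne (s : List Char) : (pvRuns s).2 ≠ [] := by
  rw [pvRuns]
  dsimp only
  split <;> simp

theorem pvRuns_head0 (s : List Char) (h : pvHeadDigit s = false) :
    (pvRuns s).2.head! = 0 := by
  cases s with
  | nil => rw [pvRuns_nil]; rfl
  | cons c t =>
    simp only [pvHeadDigit] at h
    rw [pvRuns_nondigit c t h]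
    rfl

theorem pvConsHeadTail {l : List Int} (h : l ≠ []) : l.head! :: l.tail = l := by
  cases l with
  | nil => exact absurd rfl h
  | cons a t => rfl

-- the head value of pvRuns's value list, reconstructed: it is 0 unless the string
-- starts with a digit
theorem pvRuns_vals_reconstruct (t : List Char) :
    (if pvHeadDigit t then (pvRuns t).2.head! else 0) :: (pvRuns t).2.tail = (pvRuns t).2 := by
  cases ht : pvHeadDigit t with
  | true => simp only [if_pos]; exact pvConsHeadTail (pvRuns_vals_ne t)
  | false =>
    rw [if_neg (by simp), ← pvRuns_head0 t ht]
    exact pvConsHeadTail (pvRuns_vals_ne t)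

-- unified digit-step characterisation of pvRuns
theorem pvRuns_digit (c : Char) (t : List Char) (hc : c.isDigit = true) :
    pvRuns (c :: t)
      = ((pvRuns t).1,
         (if pvHeadDigit t then (pvRuns t).2.head! else ((c.toNat : Int) - 48))
           :: (pvRuns t).2.tail) := by
  cases ht : pvHeadDigit t with
  | false => rw [pvRuns_digit_stop c t hc ht]; simp
  | true =>
    cases t with
    | nil => simp [pvHeadDigit] at ht
    | cons d t' =>
      simp only [pvHeadDigit] at ht
      rw [pvRuns_digit_digit c d t' hc ht]
      simp only [if_pos]
      have : (pvRuns (d :: t')).2.head! :: (pvRuns (d :: t')).2.tail = (pvRuns (d :: t')).2 :=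
        pvConsHeadTail (pvRuns_vals_ne (d :: t'))
      rw [this]

-- B's accumulator loop, related to its pure form
theorem pvGoB_eq_runs (s : List Char) (ls : List Char) (vs : List Int) :
    pvGoB s ls vs = (ls ++ (pvRuns s).1, vs ++ (pvRuns s).2) := by
  rw [pvGoB, pvRuns]
  by_cases h : s.dropWhile Char.isDigit = []
  · simp [h]
  · simp only [dif_neg h]
    rw [pvGoB_eq_runs (s.dropWhile Char.isDigit).tail]
    simp
termination_by s.length
decreasing_by
  have hle : (s.dropWhile Char.isDigit).length ≤ s.length := by
    simpa using List.length_dropWhile_le (p := Char.isDigit) (l := s)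
  have hpos : 0 < (s.dropWhile Char.isDigit).length := List.length_pos_of_ne_nil h
  simp [List.length_tail]
  omega

-- Core invariant: A's loop from state (ls, ws ++ [w]) equals B's run-based result,
-- with the last slot w merged into B's first gap value when the next char is a digit.
theorem pvLoop_goB (s : List Char) : ∀ (ls : List Char) (ws : List Int) (w : Int),
    pvLoopA s (ls, ws ++ [w])
      = (ls ++ (pvRuns s).1,
         ws ++ (if pvHeadDigit s then (pvRuns s).2.head! else w) :: (pvRuns s).2.tail) := by
  induction s with
  | nil =>
    intro ls ws w
    rw [pvRuns_nil]
    simp [pvLoopA, pvHeadDigit]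
  | cons c t ih =>
    intro ls ws w
    cases hc : c.isDigit with
    | true =>
      have step : pvLoopA (c :: t) (ls, ws ++ [w])
          = pvLoopA t (ls, ws ++ [((c.toNat : Int) - 48)]) := by
        simp [pvLoopA, hc]
      rw [step, ih, pvRuns_digit c t hc]
      simp [pvHeadDigit, hc]
    | false =>
      have step : pvLoopA (c :: t) (ls, ws ++ [w])
          = pvLoopA t (ls ++ [c], (ws ++ [w]) ++ [0]) := by
        simp [pvLoopA, hc]
      rw [step, ih, pvRuns_nondigit c t hc]
      rw [pvRuns_vals_reconstruct t]
      simp [pvHeadDigit, hc]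

-- ===== VERDICT (by name: the statement is the Claim_ definition above) =====
theorem parse_hyphen_pattern_spec : Claim_equal_parse_hyphen_pattern := by
  unfold Claim_equal_parse_hyphen_pattern
  intro pattern _
  unfold Spec_parse_hyphen_pattern parse_hyphen_pattern parse_hyphen_pattern_alt
  have h := pvLoop_goB pattern.toList [] [] 0
  simp only [List.nil_append] at h
  rw [h, pvRuns_vals_reconstruct pattern.toList, pvGoB_eq_runs]
  simp
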